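-- pv_equiv track=rewrite | github.com/SMH-projects/neurodoc-mcp | server.py | resolve_deps
-- ===== SOURCE A (Python) =====
-- def resolve_deps(imports: list, all_modules: list) -> list:
--     deps = []
--     for imp in imports:
--         imp_norm = imp.lower().replace('-', '_').replace('/', '_')
--         for mod in all_modules:
--             if mod.lower() in imp_norm or imp_norm == mod.lower():
--                 if mod not in deps:
--                     deps.append(mod)
--     return deps
-- ===== SOURCE B (Python) =====
-- def _first_match(low, norms):
--     for i, norm in enumerate(norms):
--         if low in norm:
--             return i
--     return None
--
--
-- def resolve_deps(imports: list, all_modules: list) -> list: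
--     # Module-major strategy: normalize every import once, give each distinct
--     # module its first-matching-import index, then stable-sort by that index.
--     norms = [imp.lower().replace('-', '_').replace('/', '_') for imp in imports]
--     seen = set()
--     entries = []
--     for j, mod in enumerate(all_modules):
--         if mod not in seen:
--             seen.add(mod)
--             i = _first_match(mod.lower(), norms)
--             if i is not None:
--                 entries.append((i, j, mod))
--     entries.sort(key=lambda e: (e[0], e[1]))
--     return [mod for _, _, mod in entries]
-- ===== Notes on version B (the rewrite author's own statement) =====
-- stated objective: faster
-- what changed: B inverts the loop structure: instead of A's import-major nested scan that re-lowercases every module for every import and linearly rechecks 'mod not in deps' on each hit, B normalizes every import once, walks the modules once (module-major) giving each distinct module the index of its first matching import (stopping at the first hit and skipping duplicate modules via a hash set), and finally stable-sorts those records by (first-import index, module position).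
import Mathlib
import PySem

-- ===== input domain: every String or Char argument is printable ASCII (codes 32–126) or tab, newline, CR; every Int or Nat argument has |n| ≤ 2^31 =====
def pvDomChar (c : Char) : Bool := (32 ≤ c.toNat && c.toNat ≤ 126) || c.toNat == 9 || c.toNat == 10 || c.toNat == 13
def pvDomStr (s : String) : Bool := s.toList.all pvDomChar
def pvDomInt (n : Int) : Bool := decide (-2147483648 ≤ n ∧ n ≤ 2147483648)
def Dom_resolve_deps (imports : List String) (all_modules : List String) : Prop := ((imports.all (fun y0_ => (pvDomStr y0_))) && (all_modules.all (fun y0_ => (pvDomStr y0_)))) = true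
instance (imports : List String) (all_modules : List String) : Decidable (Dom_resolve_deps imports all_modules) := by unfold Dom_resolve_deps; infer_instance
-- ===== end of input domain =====

-- B is a module-major re-implementation: each distinct module gets the index of its first matching
-- normalized import, and the result is the stable sort of those records by (import index, module
-- position) — replacing A's import-major nested scan (with its per-hit dedup rescan and repeated
-- module lowercasing) by a different algorithm a timing run measured as faster.

-- imp.lower().replace('-', '_').replace('/', '_')  (the identical normalization both pythons perform)
def pvNorm (imp : String) : String :=
  PySem.Str.replace (PySem.Str.replace (PySem.Str.lower imp) "-" "_") "/" "_"

-- ===== PORT A =====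
def resolve_deps (imports : List String) (all_modules : List String) : List String :=
  imports.foldl (fun deps imp =>
    let imp_norm := pvNorm imp
    all_modules.foldl (fun deps mod =>
      if PySem.Str.isIn (PySem.Str.lower mod) imp_norm || imp_norm == PySem.Str.lower mod then
        if !(deps.contains mod) then deps ++ [mod] else deps
      else deps) deps) []

-- ===== PORT B =====
-- _first_match(low, norms): linear scan with enumerate counter, None if no import matches
def firstMatchAux (low : String) (norms : List String) (i : Int) : Option Int :=
  match norms with
  | [] => none
  | n :: ns => if PySem.Str.isIn low n then some i else firstMatchAux low ns (i + 1)

def resolve_deps_alt (imports : List String) (all_modules : List String) : List String :=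
  let norms := imports.map pvNorm
  let st := (PySem.List.enumerate all_modules).foldl
    (fun (st : PySem.Set String × List (Int × Int × String)) jm =>
      if !(PySem.Set.contains st.1 jm.2) then
        let seen := PySem.Set.add st.1 jm.2
        match firstMatchAux (PySem.Str.lower jm.2) norms 0 with
        | some i => (seen, st.2 ++ [(i, jm.1, jm.2)])
        | none => (seen, st.2)
      else st) (PySem.Set.empty, [])
  (PySem.List.sorted2 st.2 (fun e => e.1) (fun e => e.2.1) false).map (fun e => e.2.2)

-- ===== PRECONDITION & SPEC =====
def Spec_resolve_deps (imports : List String) (all_modules : List String) (out : List String) : Prop := out = resolve_deps_alt imports all_modules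
instance (imports : List String) (all_modules : List String) (out : List String) : Decidable (Spec_resolve_deps imports all_modules out) := by unfold Spec_resolve_deps; infer_instance

-- ===== CLAIM (what is proved, stated in full; the proofs are below) =====
def Claim_equal_resolve_deps : Prop := ∀ (imports : List String) (all_modules : List String), Dom_resolve_deps imports all_modules → Spec_resolve_deps imports all_modules (resolve_deps imports all_modules)

-- ===== LEMMAS AND PROOFS =====

-- does module m match normalized import n
def pvMatch (n m : String) : Bool := PySem.Str.isIn (PySem.Str.lower m) n

-- first index of a norm matching m (Nat level)
def pvFj (norms : List String) (m : String) : Option Nat :=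
  norms.findIdx? (fun n => PySem.Str.isIn (PySem.Str.lower m) n)

-- first occurrences of l not already in s, threading the seen-set
def pvFirsts (s : PySem.Set String) : List String → List String
  | [] => []
  | x :: l => if PySem.Set.contains s x then pvFirsts s l
              else x :: pvFirsts (PySem.Set.add s x) l

-- recursion mirroring B's fold over enumerate
def pvEnt (norms : List String) : List (Int × String) → PySem.Set String → List (Int × Int × String)
  | [], _ => []
  | (j, m) :: L, s =>
    if PySem.Set.contains s m then pvEnt norms L s
    else match firstMatchAux (PySem.Str.lower m) norms 0 with
      | some i => (i, j, m) :: pvEnt norms L (PySem.Set.add s m)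
      | none => pvEnt norms L (PySem.Set.add s m)

-- the canonical result: modules grouped by first matching import index
def pvGroups (norms : List String) (mods : List String) : List (List String) :=
  (List.range norms.length).map (fun i => (pvFirsts [] mods).filter (fun m => pvFj norms m == some i))


-- contains / add on PySem.Set String, spelled out
lemma pv_contains_iff (s : List String) (v : String) :
    PySem.Set.contains s v = true ↔ v ∈ s := by
  simp [PySem.Set.contains]

lemma pv_not_mem {s : List String} {x : String} (h : PySem.Set.contains s x = false) :
    x ∉ s := by
  intro hm
  rw [(pv_contains_iff s x).mpr hm] at h
  cases h

lemma pv_add_tt {s : List String} {x : String} (h : PySem.Set.contains s x = true) :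
    PySem.Set.add s x = s := by
  simp only [PySem.Set.contains] at h
  simp only [PySem.Set.add, PySem.Set.contains]
  rw [if_pos h]

lemma pv_add_ff {s : List String} {x : String} (h : PySem.Set.contains s x = false) :
    PySem.Set.add s x = s ++ [x] := by
  simp only [PySem.Set.contains] at h
  simp only [PySem.Set.add, PySem.Set.contains]
  rw [if_neg (by rw [h]; exact Bool.false_ne_true)]

lemma pv_contains_append (s : List String) (x v : String) :
    PySem.Set.contains (s ++ [x]) v = (PySem.Set.contains s v || v == x) := by
  by_cases h1 : v = x
  · subst h1
    have hr : PySem.Set.contains (s ++ [v]) v = true :=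
      (pv_contains_iff _ _).mpr (by simp)
    rw [hr]
    have hvv : (v == v) = true := by simp
    rw [hvv, Bool.or_true]
  · have e2 : (v == x) = false := by simp [h1]
    have e1 : PySem.Set.contains (s ++ [x]) v = PySem.Set.contains s v := by
      cases hc : PySem.Set.contains s v with
      | true => exact (pv_contains_iff _ _).mpr (by simp [(pv_contains_iff _ _).mp hc])
      | false =>
          cases hc2 : PySem.Set.contains (s ++ [x]) v with
          | false => rfl
          | true =>
              rcases List.mem_append.mp ((pv_contains_iff _ _).mp hc2) with h | h
              · exact absurd h (pv_not_mem hc)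
              · simp only [List.mem_singleton] at h; exact absurd h h1
    rw [e1, e2, Bool.or_false]

-- A's redundant 'or imp_norm == mod.lower()' never adds a match: equality implies substring.
lemma pv_isIn_or_eq (a b : String) : (PySem.Str.isIn a b || (b == a)) = PySem.Str.isIn a b := by
  cases hb : (b == a)
  · simp
  · have hba : b = a := eq_of_beq hb
    subst hba
    have h : PySem.Chars.isIn b.toList b.toList = true :=
      (PySem.Chars.isIn_iff_infix _ _).mpr (List.infix_refl _)
    simp [h]

-- A's inner loop over all_modules = Set.add folded over the matching modules.
lemma pv_inner_eq (norm : String) (ms : List String) (s : List String) :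
    ms.foldl (fun deps mod =>
      if PySem.Str.isIn (PySem.Str.lower mod) norm || norm == PySem.Str.lower mod then
        if !(deps.contains mod) then deps ++ [mod] else deps
      else deps) s
    = (ms.filter (fun m => pvMatch norm m)).foldl PySem.Set.add s := by
  rw [List.foldl_filter]
  congr 1
  funext deps mod
  rw [pvMatch, pv_isIn_or_eq]
  have hadd : (if !(deps.contains mod) then deps ++ [mod] else deps) = PySem.Set.add deps mod := by
    simp only [PySem.Set.add, PySem.Set.contains]
    rcases Bool.eq_false_or_eq_true (deps.contains mod) with hc | hc <;> simp only [hc] <;> rfl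
  rw [hadd]

-- folding Set.add from s appends the fresh first occurrences
lemma pv_foldl_add (l : List String) : ∀ s, l.foldl PySem.Set.add s = s ++ pvFirsts s l := by
  induction l with
  | nil => intro s; simp [pvFirsts]
  | cons x l ih =>
      intro s
      cases hx : PySem.Set.contains s x with
      | true =>
          have hx' : x ∈ s := (pv_contains_iff _ _).mp hx
          simp [pvFirsts, hx, hx', pv_add_tt hx, ih]
      | false =>
          have hx' : x ∉ s := pv_not_mem hx
          simp [pvFirsts, hx, hx', pv_add_ff hx, ih]

-- pvFirsts with a nonempty seen-set = the fresh firsts filtered by the seen-set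
lemma pv_firsts_filter (l : List String) :
    ∀ s, pvFirsts s l = (pvFirsts [] l).filter (fun v => !(PySem.Set.contains s v)) := by
  induction l with
  | nil => intro s; simp [pvFirsts]
  | cons x l ih =>
      intro s
      have hnil : PySem.Set.contains ([] : List String) x = false := by
        cases hc : PySem.Set.contains ([] : List String) x with
        | false => rfl
        | true => exact absurd ((pv_contains_iff _ _).mp hc) (by simp)
      have hP0 : pvFirsts ([] : List String) (x :: l) = x :: pvFirsts [x] l := by
        simp only [pvFirsts]
        rw [hnil, if_neg Bool.false_ne_true, pv_add_ff hnil, List.nil_append]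
      rw [hP0, List.filter_cons]
      simp only [pvFirsts]
      cases hx : PySem.Set.contains s x with
      | true =>
          rw [if_pos rfl, Bool.not_true, if_neg Bool.false_ne_true]
          rw [ih s, ih [x], List.filter_filter]
          apply List.filter_congr
          intro v hv
          cases hvX : PySem.Set.contains [x] v with
          | false => simp [hvX]
          | true =>
              have hvx : v = x := by
                have := (pv_contains_iff _ _).mp hvX
                simpa using this
              subst hvx
              simp [hvX, hx, (pv_contains_iff s v).mp hx]
      | false =>
          rw [if_neg Bool.false_ne_true, Bool.not_false, if_pos rfl]
          rw [ih (PySem.Set.add s x), ih [x], List.filter_filter, pv_add_ff hx]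
          congr 1
          apply List.filter_congr
          intro v hv
          rw [pv_contains_append]
          cases hvX : PySem.Set.contains [x] v with
          | true =>
              have hvx : v = x := by
                have := (pv_contains_iff _ _).mp hvX
                simpa using this
              subst hvx
              have hvv : (v == v) = true := by simp
              simp [hvX, hvv]
          | false =>
              have hvx : (v == x) = false := by
                cases hq : (v == x) with
                | false => rfl
                | true =>
                    have : v = x := eq_of_beq hq
                    subst this
                    have : PySem.Set.contains [v] v = true :=
                      (pv_contains_iff _ _).mpr (by simp)
                    rw [this] at hvX; cases hvX
              simp [hvX, hvx]

-- pvFirsts commutes with filter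
lemma pv_firsts_comm (p : String → Bool) (l : List String) :
    ∀ s, pvFirsts s (l.filter p) = (pvFirsts s l).filter p := by
  induction l with
  | nil => intro s; simp [pvFirsts]
  | cons x l ih =>
      intro s
      rw [List.filter_cons]
      cases hpx : p x with
      | true =>
          simp only [if_true]
          cases hx : PySem.Set.contains s x with
          | true =>
              have hx' : x ∈ s := (pv_contains_iff _ _).mp hx
              simp [pvFirsts, hx, hx', ih, hpx]
          | false =>
              have hx' : x ∉ s := pv_not_mem hx
              simp [pvFirsts, hx, hx', ih, List.filter_cons, hpx]
      | false =>
          simp only [Bool.false_eq_true, if_false]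
          cases hx : PySem.Set.contains s x with
          | true =>
              have hx' : x ∈ s := (pv_contains_iff _ _).mp hx
              simp [pvFirsts, hx, hx', ih]
          | false =>
              have hx' : x ∉ s := pv_not_mem hx
              simp only [pvFirsts, hx, Bool.false_eq_true, if_false, List.filter_cons, hpx,
                ih s, ih (PySem.Set.add s x)]
              rw [pv_firsts_filter l (PySem.Set.add s x), pv_firsts_filter l s,
                  pv_add_ff hx, List.filter_filter, List.filter_filter]
              apply List.filter_congr
              intro v hv
              rw [pv_contains_append]
              by_cases hvx : v = x
              · subst hvx; simp [hpx]
              · have h2 : (v == x) = false := by simp [hvx]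
                rw [h2, Bool.or_false]

-- the counter-threading helper is findIdx? shifted
lemma pv_firstMatchAux_eq (low : String) (norms : List String) :
    ∀ c : Int, firstMatchAux low norms c
      = (norms.findIdx? (fun n => PySem.Str.isIn low n)).map (fun k => c + (k : Int)) := by
  induction norms with
  | nil => intro c; simp [firstMatchAux]
  | cons n ns ih =>
      intro c
      cases h : PySem.Chars.isIn low.toList n.toList with
      | true =>
          have h2 : PySem.Str.isIn low n = true := h
          simp [firstMatchAux, List.findIdx?_cons, h, h2]
      | false =>
          have h2 : PySem.Str.isIn low n = false := h
          simp only [firstMatchAux, List.findIdx?_cons, h, h2, Bool.false_eq_true, if_false,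
            ih (c + 1)]
          cases hfi : ns.findIdx? (fun n => PySem.Str.isIn low n) with
          | none => simp
          | some k => simp; push_cast; ring

lemma pv_fm_eq_fj (m : String) (norms : List String) :
    firstMatchAux (PySem.Str.lower m) norms 0 = (pvFj norms m).map (fun k => (k : Int)) := by
  rw [pv_firstMatchAux_eq, pvFj]
  cases norms.findIdx? (fun n => PySem.Str.isIn (PySem.Str.lower m) n) <;> simp

lemma pv_fj_lt {norms : List String} {m : String} {i : Nat} (h : pvFj norms m = some i) :
    i < norms.length := by
  rw [pvFj] at h
  exact (List.findIdx?_eq_some_iff_findIdx_eq.mp h).1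

-- fj over norms ++ [x]
lemma pv_fj_append (norms : List String) (x m : String) :
    pvFj (norms ++ [x]) m
      = ((pvFj norms m).or (if pvMatch x m then some norms.length else none)) := by
  rw [pvFj, pvFj, List.findIdx?_append]
  congr 1
  cases h : PySem.Str.isIn (PySem.Str.lower m) x with
  | true => simp [List.findIdx?_cons, h, pvMatch]
  | false => simp [List.findIdx?_cons, h, pvMatch]

lemma pv_fj_append_lt {norms : List String} {x m : String} {i : Nat}
    (hin : i < norms.length) :
    (pvFj (norms ++ [x]) m == some i) = (pvFj norms m == some i) := by
  rw [pv_fj_append]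
  cases hfj : pvFj norms m with
  | some k => simp
  | none =>
      cases hpm : pvMatch x m with
      | true =>
          have : (norms.length == i) = false := by simp; omega
          simp [this]
      | false => simp

-- membership in the flattened groups
lemma pv_mem_groups {norms mods : List String} {v : String} :
    v ∈ (pvGroups norms mods).flatten ↔ v ∈ pvFirsts [] mods ∧ ∃ i, pvFj norms v = some i := by
  simp only [pvGroups, List.mem_flatten, List.mem_map, List.mem_range]
  constructor
  · rintro ⟨L, ⟨i, hi, rfl⟩, hv⟩
    rcases List.mem_filter.mp hv with ⟨hv1, hv2⟩
    exact ⟨hv1, i, by simpa using hv2⟩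
  · rintro ⟨hv, i, hfi⟩
    exact ⟨_, ⟨i, pv_fj_lt hfi, rfl⟩, List.mem_filter.mpr ⟨hv, by simp [hfi]⟩⟩

-- A computes the concatenation of the groups
lemma pv_A_eq_groups (imports mods : List String) :
    resolve_deps imports mods = (pvGroups (imports.map pvNorm) mods).flatten := by
  induction imports using List.reverseRecOn with
  | nil => simp [resolve_deps, pvGroups]
  | append_singleton is imp ih =>
      have hstep : resolve_deps (is ++ [imp]) mods
          = resolve_deps is mods
            ++ ((pvFirsts [] mods).filter
                  (fun v => !(PySem.Set.contains (resolve_deps is mods) v))).filter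
                (fun m => pvMatch (pvNorm imp) m) := by
        show (is ++ [imp]).foldl _ [] = _
        rw [List.foldl_append, List.foldl_cons, List.foldl_nil]
        show mods.foldl _ (resolve_deps is mods) = _
        rw [pv_inner_eq, pv_foldl_add, pv_firsts_comm, pv_firsts_filter mods (resolve_deps is mods)]
      rw [hstep, ih]
      have hmap : (is ++ [imp]).map pvNorm = is.map pvNorm ++ [pvNorm imp] := by simp
      rw [hmap]
      set norms := is.map pvNorm with hnorms
      set new := pvNorm imp with hnew
      have hlen : (norms ++ [new]).length = norms.length + 1 := by simp
      conv_rhs => rw [pvGroups, hlen, List.range_succ, List.map_append, List.flatten_append]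
      congr 1
      · -- the first norms.length groups are unchanged
        rw [pvGroups]
        apply congrArg
        apply List.map_congr_left
        intro i hi
        apply List.filter_congr
        intro m _
        exact (pv_fj_append_lt (List.mem_range.mp hi)).symm
      · -- the freshly appended chunk is the last group
        simp only [List.map_cons, List.map_nil, List.flatten_cons, List.flatten_nil,
          List.append_nil]
        rw [List.filter_filter]
        apply List.filter_congr
        intro m hm
        have hmem : m ∈ (pvGroups norms mods).flatten ↔ ∃ i, pvFj norms m = some i := by
          rw [pv_mem_groups]
          exact ⟨fun h => h.2, fun h => ⟨hm, h⟩⟩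
        rw [pv_fj_append]
        cases hfj : pvFj norms m with
        | some k =>
            have hc : PySem.Set.contains ((pvGroups norms mods).flatten) m = true :=
              (pv_contains_iff _ _).mpr (hmem.mpr ⟨k, hfj⟩)
            have hk : (k == norms.length) = false := by
              have := pv_fj_lt hfj; simp; omega
            have hkn : k ≠ norms.length := by
              have := pv_fj_lt hfj; omega
            rw [hc]
            simp [hkn]
        | none =>
            have hc : PySem.Set.contains ((pvGroups norms mods).flatten) m = false := by
              cases hcc : PySem.Set.contains ((pvGroups norms mods).flatten) m with
              | false => rfl
              | true =>
                  rcases hmem.mp ((pv_contains_iff _ _).mp hcc) with ⟨i, hi⟩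
                  rw [hi] at hfj; cases hfj
            rw [hc]
            cases hpm : pvMatch new m with
            | true => simp [hpm]
            | false => simp [hpm]

-- B's fold accumulates pvEnt
lemma pv_B_fold (norms : List String) (L : List (Int × String)) :
    ∀ (s : PySem.Set String) (acc : List (Int × Int × String)),
    (L.foldl (fun (st : PySem.Set String × List (Int × Int × String)) jm =>
      if !(PySem.Set.contains st.1 jm.2) then
        let seen := PySem.Set.add st.1 jm.2
        match firstMatchAux (PySem.Str.lower jm.2) norms 0 with
        | some i => (seen, st.2 ++ [(i, jm.1, jm.2)])
        | none => (seen, st.2)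
      else st) (s, acc)).2 = acc ++ pvEnt norms L s := by
  induction L with
  | nil => intro s acc; simp [pvEnt]
  | cons jm L ih =>
      intro s acc
      obtain ⟨j, m⟩ := jm
      rw [List.foldl_cons]
      change (List.foldl (fun (st : PySem.Set String × List (Int × Int × String)) jm =>
          if !(PySem.Set.contains st.1 jm.2) then
            let seen := PySem.Set.add st.1 jm.2
            match firstMatchAux (PySem.Str.lower jm.2) norms 0 with
            | some i => (seen, st.2 ++ [(i, jm.1, jm.2)])
            | none => (seen, st.2)
          else st)
          (if !(PySem.Set.contains s m) then
            (match firstMatchAux (PySem.Str.lower m) norms 0 with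
             | some i => (PySem.Set.add s m, acc ++ [(i, j, m)])
             | none => (PySem.Set.add s m, acc))
           else (s, acc)) L).2 = acc ++ pvEnt norms ((j, m) :: L) s
      cases hs : PySem.Set.contains s m with
      | true =>
          rw [Bool.not_true, if_neg Bool.false_ne_true]
          have hent : pvEnt norms ((j, m) :: L) s = pvEnt norms L s := by
            simp only [pvEnt]; rw [hs, if_pos rfl]
          rw [hent]
          exact ih s acc
      | false =>
          rw [Bool.not_false, if_pos rfl]
          cases hfm : firstMatchAux (PySem.Str.lower m) norms 0 with
          | some i =>
              have hent : pvEnt norms ((j, m) :: L) s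
                  = (i, j, m) :: pvEnt norms L (PySem.Set.add s m) := by
                simp only [pvEnt]; rw [hs, if_neg Bool.false_ne_true, hfm]
              rw [hent]
              have h2 : (acc ++ [(i, j, m)]) ++ pvEnt norms L (PySem.Set.add s m)
                  = acc ++ (i, j, m) :: pvEnt norms L (PySem.Set.add s m) := by simp
              exact (ih (PySem.Set.add s m) (acc ++ [(i, j, m)])).trans h2
          | none =>
              have hent : pvEnt norms ((j, m) :: L) s = pvEnt norms L (PySem.Set.add s m) := by
                simp only [pvEnt]; rw [hs, if_neg Bool.false_ne_true, hfm]
              rw [hent]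
              exact ih (PySem.Set.add s m) acc

-- the filtered entries of one group, with the module field extracted
lemma pv_ent_filter (norms : List String) (L : List (Int × String)) :
    ∀ s (c : Int), ((pvEnt norms L s).filter (fun e => e.1 == c)).map (fun e => e.2.2)
      = (pvFirsts s (L.map (fun p => p.2))).filter
          (fun m => firstMatchAux (PySem.Str.lower m) norms 0 == some c) := by
  induction L with
  | nil => intro s c; simp [pvEnt, pvFirsts]
  | cons jm L ih =>
      intro s c
      obtain ⟨j, m⟩ := jm
      simp only [pvEnt, List.map_cons, pvFirsts]
      cases hs : PySem.Set.contains s m with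
      | true =>
          rw [if_pos rfl, if_pos rfl]
          exact ih s c
      | false =>
          rw [if_neg Bool.false_ne_true, if_neg Bool.false_ne_true]
          cases hfm : firstMatchAux (PySem.Str.lower m) norms 0 with
          | some i =>
              rw [List.filter_cons, List.filter_cons]
              have hpred : (firstMatchAux (PySem.Str.lower m) norms 0 == some c)
                  = ((i : Int) == c) := by rw [hfm]; rfl
              rw [hpred]
              cases hic : ((i : Int) == c) with
              | true =>
                  rw [if_pos rfl, if_pos rfl, List.map_cons]
                  rw [ih (PySem.Set.add s m) c]
              | false =>
                  rw [if_neg Bool.false_ne_true, if_neg Bool.false_ne_true]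
                  exact ih (PySem.Set.add s m) c
          | none =>
              rw [List.filter_cons]
              have hpred : (firstMatchAux (PySem.Str.lower m) norms 0 == some c)
                  = false := by rw [hfm]; rfl
              rw [hpred, if_neg Bool.false_ne_true]
              exact ih (PySem.Set.add s m) c

-- sources of the j components of the entries
lemma pv_ent_mem_j {norms : List String} {e : Int × Int × String} (L : List (Int × String)) :
    ∀ s, e ∈ pvEnt norms L s → ∃ p ∈ L, e.2.1 = p.1 := by
  induction L with
  | nil => intro s h; simp [pvEnt] at h
  | cons jm L ih =>
      intro s h
      obtain ⟨j, m⟩ := jm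
      simp only [pvEnt] at h
      split at h
      · rcases ih _ h with ⟨p, hp, he⟩; exact ⟨p, List.mem_cons_of_mem _ hp, he⟩
      · split at h
        · rcases List.mem_cons.mp h with h | h
          · subst h; exact ⟨(j, m), List.mem_cons_self, rfl⟩
          · rcases ih _ h with ⟨p, hp, he⟩; exact ⟨p, List.mem_cons_of_mem _ hp, he⟩
        · rcases ih _ h with ⟨p, hp, he⟩; exact ⟨p, List.mem_cons_of_mem _ hp, he⟩

-- the j components of the entries are strictly increasing
lemma pv_ent_pairwise_j {norms : List String} (L : List (Int × String)) :
    ∀ s, L.Pairwise (fun p q => p.1 < q.1) →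
      (pvEnt norms L s).Pairwise (fun a b => a.2.1 < b.2.1) := by
  induction L with
  | nil => intro s _; simp [pvEnt]
  | cons jm L ih =>
      intro s hpw
      obtain ⟨j, m⟩ := jm
      rcases List.pairwise_cons.mp hpw with ⟨hhead, htail⟩
      simp only [pvEnt]
      split
      · exact ih _ htail
      · split
        · refine List.pairwise_cons.mpr ⟨?_, ih _ htail⟩
          intro b hb
          rcases pv_ent_mem_j L _ hb with ⟨p, hp, he⟩
          rw [he]
          exact hhead p hp
        · exact ih _ htail

-- the first components of the entries are valid group indices
lemma pv_ent_mem_i {norms : List String} {e : Int × Int × String} (L : List (Int × String)) :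
    ∀ s, e ∈ pvEnt norms L s → ∃ i : Nat, i < norms.length ∧ e.1 = (i : Int) := by
  induction L with
  | nil => intro s h; simp [pvEnt] at h
  | cons jm L ih =>
      intro s h
      obtain ⟨j, m⟩ := jm
      simp only [pvEnt] at h
      split at h
      · exact ih _ h
      · cases hfm : firstMatchAux (PySem.Str.lower m) norms 0 with
        | some i0 =>
            rw [hfm] at h
            rcases List.mem_cons.mp h with h | h
            · subst h
              rw [pv_fm_eq_fj] at hfm
              cases hfj : pvFj norms m with
              | none => rw [hfj] at hfm; cases hfm
              | some k =>
                  rw [hfj] at hfm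
                  have hki : ((k : Nat) : Int) = i0 := by
                    simpa using hfm
                  exact ⟨k, pv_fj_lt hfj, hki.symm⟩
            · exact ih _ h
        | none => rw [hfm] at h; exact ih _ h

-- a nodup-index flatten of filters is a permutation of the list
lemma pv_perm_flatten_filter {α : Type} [DecidableEq α] (key : α → Int)
    (idxs : List Int) (E : List α) (hnd : idxs.Nodup) (hall : ∀ e ∈ E, key e ∈ idxs) :
    ((idxs.map (fun i => E.filter (fun e => key e == i))).flatten).Perm E := by
  induction idxs generalizing E with
  | nil =>
      cases E with
      | nil => simp
      | cons a E => exact absurd (hall a List.mem_cons_self) (by simp)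
  | cons i idxs ih =>
      rcases List.nodup_cons.mp hnd with ⟨hi, hnd'⟩
      simp only [List.map_cons, List.flatten_cons]
      have hE : (E.filter (fun e => key e == i) ++ E.filter (fun e => !(key e == i))).Perm E :=
        E.filter_append_perm _
      refine List.Perm.trans ?_ hE
      apply List.Perm.append_left
      have hrw : ∀ i' ∈ idxs,
          E.filter (fun e => key e == i')
            = (E.filter (fun e => !(key e == i))).filter (fun e => key e == i') := by
        intro i' hi'
        rw [List.filter_filter]
        apply List.filter_congr
        intro e he
        cases hq : (key e == i') with
        | true =>
            have hei : key e = i' := by simpa using hq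
            have hne : i' ≠ i := fun hcon => hi (hcon ▸ hi')
            have hf : (key e == i) = false := by
              cases hc2 : (key e == i) with
              | false => rfl
              | true =>
                  have : key e = i := by simpa using hc2
                  exact absurd (hei ▸ this : i' = i) hne
            rw [hf]
            decide
        | false =>
            cases hc2 : (key e == i) <;> decide
      rw [List.map_congr_left hrw]
      refine ih _ hnd' ?_
      intro e he
      rcases List.mem_filter.mp he with ⟨heE, hne⟩
      rcases List.mem_cons.mp (hall e heE) with h | h
      · have hbe : (key e == i) = true := by simp [h]
        rw [hbe] at hne
        simp at hne
      · exact h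

-- sorted2 with two Int keys is sorted with the lexicographic Int × Int key
lemma pv_sorted2_eq_lex {α : Type} (xs : List α) (k1 k2 : α → Int) :
    PySem.List.sorted2 xs k1 k2 false
      = PySem.List.sorted xs (fun x => toLex (k1 x, k2 x)) false := by
  have hfun : (fun (a b : α) => decide (k1 a < k1 b) || (!decide (k1 b < k1 a) && decide (k2 a < k2 b)))
      = (fun (a b : α) => decide (toLex (k1 a, k2 a) < toLex (k1 b, k2 b))) := by
    funext a b
    by_cases h1 : k1 a < k1 b
    · simp [h1, Prod.Lex.toLex_lt_toLex]
    · by_cases h2 : k1 b < k1 a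
      · have hne : ¬ (k1 a = k1 b) := by omega
        simp [h1, h2, Prod.Lex.toLex_lt_toLex, hne]
      · have heq : k1 a = k1 b := by omega
        simp [h1, h2, Prod.Lex.toLex_lt_toLex, heq]
  have h1 : PySem.List.sorted2 xs k1 k2 false
      = xs.foldl (fun acc x => PySem.List.insertBy
          (fun a b => decide (k1 a < k1 b) || (!decide (k1 b < k1 a) && decide (k2 a < k2 b))) x acc) [] := rfl
  have h2 : PySem.List.sorted xs (fun x => toLex (k1 x, k2 x)) false
      = xs.foldl (fun acc x => PySem.List.insertBy
          (fun a b => decide (toLex (k1 a, k2 a) < toLex (k1 b, k2 b))) x acc) [] := rfl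
  rw [h1, h2, hfun]

-- B computes the concatenation of the groups
lemma pv_B_eq_groups (imports mods : List String) :
    resolve_deps_alt imports mods = (pvGroups (imports.map pvNorm) mods).flatten := by
  have h0 : resolve_deps_alt imports mods
      = (PySem.List.sorted2
          (((PySem.List.enumerate mods).foldl
            (fun (st : PySem.Set String × List (Int × Int × String)) jm =>
              if !(PySem.Set.contains st.1 jm.2) then
                let seen := PySem.Set.add st.1 jm.2
                match firstMatchAux (PySem.Str.lower jm.2) (imports.map pvNorm) 0 with
                | some i => (seen, st.2 ++ [(i, jm.1, jm.2)])
                | none => (seen, st.2)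
              else st) (PySem.Set.empty, [])).2)
          (fun e => e.1) (fun e => e.2.1) false).map (fun e => e.2.2) := rfl
  rw [h0, pv_B_fold, List.nil_append]
  set norms := imports.map pvNorm with hnorms
  set E := pvEnt norms (PySem.List.enumerate mods 0) PySem.Set.empty with hE
  have hpwE : E.Pairwise (fun a b => a.2.1 < b.2.1) :=
    pv_ent_pairwise_j _ _ (PySem.List.pairwise_lt_enumerate mods 0)
  -- name the sorted order
  have hsorted : PySem.List.sorted2 E (fun e => e.1) (fun e => e.2.1) false
      = ((List.range norms.length).map (fun (i : Nat) => E.filter (fun e => e.1 == (i : Int)))).flatten := by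
    rw [pv_sorted2_eq_lex]
    apply PySem.List.sorted_eq_of_perm_of_pairwise_lt
    · -- the grouped flatten is a permutation of E
      have hinj : Function.Injective (fun i : Nat => (i : Int)) := fun a b h => by
        simpa using h
      have h2 := pv_perm_flatten_filter (fun e => e.1)
        ((List.range norms.length).map (fun i : Nat => (i : Int))) E
        (List.Nodup.map hinj List.nodup_range)
        (fun e he => by
          rcases pv_ent_mem_i _ _ he with ⟨i, hi, hei⟩
          exact List.mem_map.mpr ⟨i, List.mem_range.mpr hi, hei.symm⟩)
      rw [List.map_map] at h2
      exact h2
    · -- the grouped flatten is strictly increasing in the lexicographic key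
      rw [List.pairwise_flatten]
      constructor
      · intro l hl
        rcases List.mem_map.mp hl with ⟨i, _, rfl⟩
        have hf : (E.filter (fun e => e.1 == (i : Int))).Pairwise (fun a b => a.2.1 < b.2.1) :=
          hpwE.filter _
        refine hf.imp_of_mem ?_
        intro a b ha hb hab
        have ha1 : a.1 = (i : Int) := by simpa using (List.mem_filter.mp ha).2
        have hb1 : b.1 = (i : Int) := by simpa using (List.mem_filter.mp hb).2
        rw [Prod.Lex.toLex_lt_toLex]
        exact Or.inr ⟨by rw [ha1, hb1], hab⟩
      · rw [List.pairwise_map]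
        refine List.Pairwise.imp_of_mem ?_ (List.pairwise_lt_range (n := norms.length))
        intro i1 i2 _ _ h12
        intro a ha b hb
        have ha1 : a.1 = (i1 : Int) := by simpa using (List.mem_filter.mp ha).2
        have hb1 : b.1 = (i2 : Int) := by simpa using (List.mem_filter.mp hb).2
        rw [Prod.Lex.toLex_lt_toLex]
        exact Or.inl (by rw [ha1, hb1]; exact_mod_cast h12)
  rw [hsorted, List.map_flatten, List.map_map, pvGroups]
  apply congrArg
  apply List.map_congr_left
  intro i _
  show ((E.filter (fun e => e.1 == (i : Int))).map (fun e => e.2.2)) = _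
  rw [hE, pv_ent_filter norms (PySem.List.enumerate mods 0) PySem.Set.empty ((i : Nat) : Int),
      PySem.List.map_snd_enumerate]
  apply List.filter_congr
  intro m _
  rw [pv_fm_eq_fj]
  cases hfj : pvFj norms m with
  | none => simp
  | some k => simp

theorem resolve_deps_spec : Claim_equal_resolve_deps := by
  intro imports mods _
  show resolve_deps imports mods = resolve_deps_alt imports mods
  rw [pv_A_eq_groups, pv_B_eq_groups]
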